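-- pv_equiv track=rewrite | github.com/kon-218/ligand-x | services/docking/service.py | _parse_pdbqt_models
-- ===== SOURCE A (Python) =====
-- from typing import Optional, Dict, Any, List
--
-- def _parse_pdbqt_models(pdbqt_data: str) -> List[str]:
--     """Parse multi-model PDBQT into individual pose strings."""
--     poses = []
--     lines = pdbqt_data.strip().split('\n')
--     current_pose = []
--     in_model = False
--
--     for line in lines:
--         if line.startswith('MODEL'):
--             in_model = True
--             current_pose = []
--         elif line.startswith('ENDMDL'):
--             if current_pose:
--                 poses.append('\n'.join(current_pose))
--             in_model = False
--             current_pose = []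
--         elif in_model:
--             current_pose.append(line)
--
--     # If no MODEL/ENDMDL tags, treat entire content as one pose
--     if not poses and lines:
--         poses.append(pdbqt_data)
--
--     return poses
-- ===== SOURCE B (Python) =====
-- from typing import List
--
--
-- def _parse_pdbqt_models(pdbqt_data: str) -> List[str]:
--     """Parse multi-model PDBQT into individual pose strings.
--
--     Single backwards scan: from each ENDMDL walk back to the nearest MODEL,
--     so a mid-model MODEL reset needs no special handling.
--     """
--     lines = pdbqt_data.strip().split('\n')
--     poses = []
--     buf = []          # lines of the pose currently being collected (backwards)
--     collecting = False
--     for line in reversed(lines):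
--         if line.startswith('MODEL'):
--             if collecting and buf:
--                 poses.insert(0, '\n'.join(buf))
--             buf = []
--             collecting = False
--         elif line.startswith('ENDMDL'):
--             buf = []
--             collecting = True
--         elif collecting:
--             buf.insert(0, line)
--     return poses if poses else [pdbqt_data]
-- ===== Notes on version B (the rewrite author's own statement) =====
-- stated objective: alternative
-- what changed: Replaces the forward in_model state machine with a single backwards scan that, from each ENDMDL marker, collects lines until the nearest preceding MODEL marker (prepending as it goes), so the mid-model reset rule falls out of the traversal order instead of explicit buffer resets.
import Mathlib
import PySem

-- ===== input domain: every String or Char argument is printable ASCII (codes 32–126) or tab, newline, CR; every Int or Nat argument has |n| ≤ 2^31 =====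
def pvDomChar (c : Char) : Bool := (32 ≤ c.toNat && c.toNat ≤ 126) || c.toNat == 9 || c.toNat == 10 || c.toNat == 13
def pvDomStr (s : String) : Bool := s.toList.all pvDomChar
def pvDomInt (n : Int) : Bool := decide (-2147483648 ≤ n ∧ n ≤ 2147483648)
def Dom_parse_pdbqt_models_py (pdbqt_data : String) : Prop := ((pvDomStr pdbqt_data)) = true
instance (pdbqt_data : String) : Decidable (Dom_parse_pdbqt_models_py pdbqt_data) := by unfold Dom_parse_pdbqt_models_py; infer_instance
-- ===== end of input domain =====

-- B replaces A's forward in_model state machine by a single backwards scan (ENDMDL back to the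
-- nearest MODEL); same cost, different traversal ("alternative").

-- ===== PORT A =====
-- lines = pdbqt_data.strip().split('\n')  (sep '\n' ≠ "", so Python's split returns normally)
def pvLines (pdbqt_data : String) : List String :=
  (PySem.Chars.splitOn (PySem.Str.strip pdbqt_data).toList ['\n']).map String.ofList

-- the body of A's for-loop; state = (poses, current_pose, in_model)
def pvAStep (s : List String × List String × Bool) (line : String) :
    List String × List String × Bool :=
  if PySem.Str.startswith line "MODEL" then (s.1, [], true)
  else if PySem.Str.startswith line "ENDMDL" then
    ((if s.2.1 ≠ [] then s.1 ++ [PySem.Str.join "\n" s.2.1] else s.1), [], false)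
  else if s.2.2 then (s.1, s.2.1 ++ [line], s.2.2)
  else s

def parse_pdbqt_models_py (pdbqt_data : String) : List String :=
  let lines := pvLines pdbqt_data
  let st := lines.foldl pvAStep ([], [], false)
  if st.1 = [] ∧ lines ≠ [] then [pdbqt_data] else st.1

-- ===== PORT B =====
-- the body of B's reversed-loop; state = (poses, buf, collecting); 'for line in reversed(lines)'
-- with insert(0, …) is List.foldr of this step
def pvBStep (line : String) (s : List String × List String × Bool) :
    List String × List String × Bool :=
  if PySem.Str.startswith line "MODEL" then
    ((if s.2.2 ∧ s.2.1 ≠ [] then PySem.Str.join "\n" s.2.1 :: s.1 else s.1), [], false)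
  else if PySem.Str.startswith line "ENDMDL" then (s.1, [], true)
  else (s.1, (if s.2.2 then line :: s.2.1 else s.2.1), s.2.2)

def parse_pdbqt_models_py_alt (pdbqt_data : String) : List String :=
  let poses := ((pvLines pdbqt_data).foldr pvBStep ([], [], false)).1
  if poses = [] then [pdbqt_data] else poses

-- ===== PRECONDITION & SPEC =====
def Spec_parse_pdbqt_models_py (pdbqt_data : String) (out : List String) : Prop := out = parse_pdbqt_models_py_alt pdbqt_data
instance (pdbqt_data : String) (out : List String) : Decidable (Spec_parse_pdbqt_models_py pdbqt_data out) := by unfold Spec_parse_pdbqt_models_py; infer_instance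

-- ===== CLAIM (what is proved, stated in full; the proofs are below) =====
def Claim_equal_parse_pdbqt_models_py : Prop := ∀ (pdbqt_data : String), Dom_parse_pdbqt_models_py pdbqt_data → Spec_parse_pdbqt_models_py pdbqt_data (parse_pdbqt_models_py pdbqt_data)

-- ===== LEMMAS AND PROOFS =====

-- the extra poses A's loop produces from state (cur, inm), expressed through B's backward scan
def pvRest (cur : List String) (inm : Bool) (r : List String × List String × Bool) : List String :=
  if r.2.2 then
    (if (cur ++ (if inm then r.2.1 else [])) ≠ []
      then [PySem.Str.join "\n" (cur ++ (if inm then r.2.1 else []))] else []) ++ r.1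
  else r.1

lemma pv_main (lines : List String) : ∀ (poses cur : List String) (inm : Bool),
    (lines.foldl pvAStep (poses, cur, inm)).1 =
      poses ++ pvRest cur inm (lines.foldr pvBStep ([], [], false)) := by
  induction lines with
  | nil => intro poses cur inm; simp [pvRest]
  | cons l rest ih =>
    intro poses cur inm
    simp only [List.foldl_cons, List.foldr_cons]
    by_cases hm : PySem.Str.startswith l "MODEL" = true
    · simp only [pvAStep, pvBStep, hm, if_pos]
      rw [ih]
      rcases h : rest.foldr pvBStep ([], [], false) with ⟨P, buf, col⟩
      cases col <;> by_cases hb : buf = [] <;> simp [pvRest, hb]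
    · by_cases he : PySem.Str.startswith l "ENDMDL" = true
      · simp only [pvAStep, pvBStep, hm, he, if_pos, Bool.false_eq_true, ite_false]
        rw [ih]
        rcases h : rest.foldr pvBStep ([], [], false) with ⟨P, buf, col⟩
        by_cases hc : cur = [] <;> cases col <;> simp [pvRest, hc]
      · simp only [pvAStep, pvBStep, hm, he, Bool.false_eq_true, ite_false]
        rcases h : rest.foldr pvBStep ([], [], false) with ⟨P, buf, col⟩
        cases inm
        · simp only [Bool.false_eq_true, ite_false]
          rw [ih, h]
          cases col <;> simp [pvRest]
        · simp only [ite_true]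
          rw [ih, h]
          cases col <;> by_cases hc : cur = [] <;> simp [pvRest, hc]

lemma pv_go_ne_nil (sep : List Char) (fuel : Nat) : ∀ (l cur : List Char) (acc : List (List Char)),
    PySem.Chars.splitOn.go sep fuel l cur acc ≠ [] := by
  induction fuel with
  | zero => intro l cur acc; simp [PySem.Chars.splitOn.go]
  | succ n ih =>
    intro l cur acc
    cases l with
    | nil => simp [PySem.Chars.splitOn.go]
    | cons c rest =>
      rw [PySem.Chars.splitOn.go]
      split
      · exact ih _ _ _
      · exact ih _ _ _

lemma pv_lines_ne_nil (pdbqt_data : String) : pvLines pdbqt_data ≠ [] := by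
  unfold pvLines PySem.Chars.splitOn
  intro h
  exact pv_go_ne_nil _ _ _ _ _ (List.map_eq_nil_iff.mp h)

-- ===== VERDICT (by name: the statement is the Claim_ definition above) =====
theorem parse_pdbqt_models_py_spec : Claim_equal_parse_pdbqt_models_py := by
  intro pdbqt_data _
  unfold Spec_parse_pdbqt_models_py parse_pdbqt_models_py parse_pdbqt_models_py_alt
  dsimp only
  have h := pv_main (pvLines pdbqt_data) [] [] false
  simp only [List.nil_append] at h
  rw [h]
  rcases hr : (pvLines pdbqt_data).foldr pvBStep ([], [], false) with ⟨P, buf, col⟩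
  cases col <;> simp [pvRest, pv_lines_ne_nil]
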